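-- pv_equiv track=rewrite | github.com/AminArshadi/Python-Codes | ITI/Test_3/f name1_300189176.py | diff_start_end
-- ===== SOURCE A (Python) =====
-- def diff_start_end(l, q):
--     '''(list of int, list of int) -> (int, int)
--
-- l and q are two parallel lists i.e. len(l)==len(q)
-- The function returns the following two integers (i.e. a tuple with
-- the following two integers).
-- - the index where l and q first differ, and
-- - the index where l and q last differ. This index should be NEGATIVE
--
-- Preconditions: len(l)==len(q)>=1, and l != q ***(The 2 lists are NOT the same)***
--
-- >>> diff_start_end([0,1,6,0,7,2,3,4], [0,1,8,0,9,2,3,4])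
-- (2, -4)
-- >>> diff_start_end([6],[8])
-- (0, -1)
-- >>> diff_start_end([0,0,0,1,0],[0,0,0,22,0])
-- (3, -2)
-- >>> diff_start_end([0,1,1],[1,1,1])
-- (0, -3)
-- >>> diff_start_end([0,1,1,0],[0,0,0,0])
-- (1, -2)
-- '''
--
-- #YOUR CODE GOES HERE
--     list = []
--     for i in range(len(l)):
--         if l[i] == q[i]:
--             list.append(0)
--         else:
--             list.append(1)
--
--     a = list.index(1)
--     inverse = list[::-1]
--     b = inverse.index(1)
--     c = -b-1
--
--     return (a, c)
-- ===== SOURCE B (Python) =====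
-- def diff_start_end(l, q):
--     first = None
--     last = None
--     for i in range(len(l)):
--         if l[i] != q[i]:
--             if first is None:
--                 first = i
--             last = i
--     if first is None:
--         raise ValueError("lists do not differ")
--     return (first, last - len(l))
-- ===== Notes on version B (the rewrite author's own statement) =====
-- stated objective: simpler
-- what changed: One pass tracking the first and last mismatching index directly, instead of materialising a 0/1 marker list and scanning it twice (forward .index and a reversed-copy .index).
import Mathlib
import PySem

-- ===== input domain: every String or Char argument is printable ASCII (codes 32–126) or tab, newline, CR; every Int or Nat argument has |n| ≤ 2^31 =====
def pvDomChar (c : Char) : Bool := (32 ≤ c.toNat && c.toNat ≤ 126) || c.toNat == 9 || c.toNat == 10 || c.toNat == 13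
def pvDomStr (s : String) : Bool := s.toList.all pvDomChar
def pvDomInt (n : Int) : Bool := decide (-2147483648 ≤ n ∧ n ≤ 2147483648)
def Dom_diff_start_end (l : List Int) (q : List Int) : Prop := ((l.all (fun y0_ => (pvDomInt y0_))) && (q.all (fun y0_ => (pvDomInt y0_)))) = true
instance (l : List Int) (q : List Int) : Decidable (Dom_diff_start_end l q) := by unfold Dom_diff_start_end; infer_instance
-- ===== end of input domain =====

-- B replaces A's 0/1 marker list and its two .index scans (one on a reversed copy) by a single pass
-- tracking the first and last mismatching index directly; same return value wherever A returns.

-- ===== PORT A =====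
-- builds the whole marker list (option-threaded: none = IndexError on q[i]), then
-- a = list.index(1), inverse = list[::-1], b = inverse.index(1), c = -b-1
def diff_start_end (l : List Int) (q : List Int) : Int × Int :=
  let list? : Option (List Int) :=
    (PySem.List.pyRange 0 l.length 1).foldl
      (fun acc? i =>
        acc?.bind fun acc =>
          match PySem.List.pyGet? l i, PySem.List.pyGet? q i with
          | some x, some y => some (if x = y then acc ++ [0] else acc ++ [1])
          | _, _ => none)
      (some [])
  match list? with
  | none => (0, 0)          -- Python: IndexError (excluded by Pre_)
  | some list =>
    match PySem.List.index? list 1 with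
    | none => (0, 0)        -- Python: ValueError from list.index(1) (excluded by Pre_)
    | some a =>
      let inverse := (PySem.List.slice? list none none (-1)).getD []   -- list[::-1]; step -1 ≠ 0, never none
      match PySem.List.index? inverse 1 with
      | none => (0, 0)      -- unreachable when a is found
      | some b => ((a : Int), -(b : Int) - 1)

-- ===== PORT B =====
-- one pass: first = first mismatching index, last = most recent; ValueError if none (excluded by Pre_)
def diff_start_end_alt (l : List Int) (q : List Int) : Int × Int :=
  let st? : Option (Option Int × Option Int) :=
    (PySem.List.pyRange 0 l.length 1).foldl
      (fun st? i =>
        st?.bind fun st =>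
          (PySem.List.pyGet? l i).bind fun x =>
            (PySem.List.pyGet? q i).map fun y =>
              if x ≠ y then ((if st.1 = none then some i else st.1), some i) else st)
      (some (none, none))
  -- Python: on IndexError / ValueError paths (st? or a tracker still none) there is no value; (0,0) stands in, excluded by Pre_
  (st?.bind fun st => st.1.bind fun f => st.2.map fun t => (f, t - (l.length : Int))).getD (0, 0)

-- ===== PRECONDITION & SPEC =====
-- Pre_ excludes exactly the inputs where A raises: q shorter than l (IndexError on q[i]) and
-- l equal to q on all of l's positions (ValueError from list.index(1)); B raises there too.
def Pre_diff_start_end (l : List Int) (q : List Int) : Prop :=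
  l.length ≤ q.length ∧ l ≠ q.take l.length
instance (l : List Int) (q : List Int) : Decidable (Pre_diff_start_end l q) := by
  unfold Pre_diff_start_end; infer_instance

def pvWitness_diff_start_end : List Int × List Int := ([0, 1, 6, 0], [0, 1, 8, 0])

def Spec_diff_start_end (l : List Int) (q : List Int) (out : Int × Int) : Prop := out = diff_start_end_alt l q
instance (l : List Int) (q : List Int) (out : Int × Int) : Decidable (Spec_diff_start_end l q out) := by unfold Spec_diff_start_end; infer_instance

-- ===== CLAIM (what is proved, stated in full; the proofs are below) =====
def Claim_equal_diff_start_end : Prop := ∀ (l : List Int) (q : List Int), Dom_diff_start_end l q → Pre_diff_start_end l q → Spec_diff_start_end l q (diff_start_end l q)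

-- ===== LEMMAS AND PROOFS =====

-- the marker value A appends at index i, and A's whole marker list for the first n indices
def pvMark (l q : List Int) (i : Int) : Int :=
  if PySem.List.pyGet? l i = PySem.List.pyGet? q i then 0 else 1

def pvM (l q : List Int) (n : Nat) : List Int :=
  (PySem.List.pyRange 0 n 1).map (pvMark l q)

theorem pvM_succ (l q : List Int) (n : Nat) :
    pvM l q (n + 1) = pvM l q n ++ [pvMark l q n] := by
  unfold pvM
  have h : ((n + 1 : Nat) : Int) = (n : Int) + 1 := by push_cast; ring
  rw [h, PySem.List.pyRange_one_succ_right (by positivity : (0:Int) ≤ (n:Int)), List.map_append]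
  simp

theorem pvM_length (l q : List Int) (n : Nat) : (pvM l q n).length = n := by
  unfold pvM
  rw [List.length_map, PySem.List.length_pyRange_one]
  omega

-- A's option-threaded marker-building fold succeeds and builds pvM when both lists are long enough
theorem foldA (l q : List Int) (n : Nat) (hl : n ≤ l.length) (hq : n ≤ q.length)
    (acc : List Int) :
    (PySem.List.pyRange 0 n 1).foldl
      (fun acc? i =>
        acc?.bind fun acc =>
          match PySem.List.pyGet? l i, PySem.List.pyGet? q i with
          | some x, some y => some (if x = y then acc ++ [0] else acc ++ [1])
          | _, _ => none)
      (some acc)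
    = some (acc ++ pvM l q n) := by
  induction n generalizing acc with
  | zero => simp [pvM, PySem.List.pyRange_one_eq_nil]
  | succ m ih =>
    have h : ((m + 1 : Nat) : Int) = (m : Int) + 1 := by push_cast; ring
    rw [h, PySem.List.pyRange_one_succ_right (by positivity : (0:Int) ≤ (m:Int)), List.foldl_append,
        ih (by omega) (by omega)]
    have hlg : PySem.List.pyGet? l (m : Int) = some (l[m]'(by omega)) := by
      rw [PySem.List.pyGet?_natCast]; exact List.getElem?_eq_getElem (by omega)
    have hqg : PySem.List.pyGet? q (m : Int) = some (q[m]'(by omega)) := by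
      rw [PySem.List.pyGet?_natCast]; exact List.getElem?_eq_getElem (by omega)
    simp only [List.foldl_cons, List.foldl_nil, Option.bind_some, hlg, hqg,
      pvM_succ, pvMark]
    by_cases hxy : l[m]'(by omega) = q[m]'(by omega) <;>
      simp [hxy, List.append_assoc]

-- B's fold state: first = index of the first 1 in pvM, last = n-1 - index of the first 1 in its reverse
theorem foldB (l q : List Int) (n : Nat) (hl : n ≤ l.length) (hq : n ≤ q.length) :
    (PySem.List.pyRange 0 n 1).foldl
      (fun st? i =>
        st?.bind fun st =>
          (PySem.List.pyGet? l i).bind fun x =>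
            (PySem.List.pyGet? q i).map fun y =>
              if x ≠ y then ((if st.1 = none then some i else st.1), some i) else st)
      (some (none, none))
    = some ((PySem.List.index? (pvM l q n) 1).map (fun a => (a : Int)),
            (PySem.List.index? (pvM l q n).reverse 1).map (fun b => (n : Int) - 1 - (b : Int))) := by
  induction n with
  | zero => simp [pvM, PySem.List.pyRange_one_eq_nil, PySem.List.index?]
  | succ m ih =>
    have h : ((m + 1 : Nat) : Int) = (m : Int) + 1 := by push_cast; ring
    rw [h, PySem.List.pyRange_one_succ_right (by positivity : (0:Int) ≤ (m:Int)), List.foldl_append,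
        ih (by omega) (by omega)]
    have hlg : PySem.List.pyGet? l (m : Int) = some (l[m]'(by omega)) := by
      rw [PySem.List.pyGet?_natCast]; exact List.getElem?_eq_getElem (by omega)
    have hqg : PySem.List.pyGet? q (m : Int) = some (q[m]'(by omega)) := by
      rw [PySem.List.pyGet?_natCast]; exact List.getElem?_eq_getElem (by omega)
    simp only [List.foldl_cons, List.foldl_nil, Option.bind_some, hlg, hqg]
    have hrev : (pvM l q (m + 1)).reverse = pvMark l q m :: (pvM l q m).reverse := by
      rw [pvM_succ]; simp
    by_cases hxy : l[m]'(by omega) = q[m]'(by omega)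
    · -- equal: marker 0, B keeps its state
      have hm0 : pvMark l q (m : Int) = 0 := by simp [pvMark, hlg, hqg, hxy]
      have hfw : PySem.List.index? (pvM l q (m + 1)) 1 = PySem.List.index? (pvM l q m) 1 := by
        rw [pvM_succ, hm0]
        by_cases hmem : (1 : Int) ∈ pvM l q m
        · exact PySem.List.index?_append_of_mem _ hmem
        · rw [(PySem.List.index?_eq_none_iff _ _).2 hmem,
              (PySem.List.index?_eq_none_iff _ _).2 (by simp [hmem])]
      have hbw : PySem.List.index? (pvM l q (m + 1)).reverse 1
          = (PySem.List.index? (pvM l q m).reverse 1).map (· + 1) := by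
        rw [hrev, hm0]; exact PySem.List.index?_cons_of_ne _ (by norm_num)
      rw [hfw, hbw]
      simp only [hxy, ne_eq]
      rcases hopt : PySem.List.index? (pvM l q m).reverse 1 with _ | b <;> simp [Function.comp]
      ring
    · -- different: marker 1, B updates last (and first when still none)
      have hm1 : pvMark l q (m : Int) = 1 := by simp [pvMark, hlg, hqg, hxy]
      have hbw : PySem.List.index? (pvM l q (m + 1)).reverse 1 = some 0 := by
        rw [hrev, hm1]; exact PySem.List.index?_cons_self _ _
      rw [hbw]
      simp only [ne_eq]
      by_cases hmem : (1 : Int) ∈ pvM l q m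
      · have hfw : PySem.List.index? (pvM l q (m + 1)) 1 = PySem.List.index? (pvM l q m) 1 := by
          rw [pvM_succ]; exact PySem.List.index?_append_of_mem _ hmem
        rcases Option.isSome_iff_exists.1 ((PySem.List.index?_isSome_iff (pvM l q m) 1).2 hmem) with ⟨a, ha⟩
        rw [PySem.List.index?_eq_idxOf?] at ha
        rw [PySem.List.index?_eq_idxOf?, PySem.List.index?_eq_idxOf?] at hfw
        simp [hfw, ha]
        intro hc
        exact absurd hc hxy
      · have hfw : PySem.List.index? (pvM l q (m + 1)) 1 = some (pvM l q m).length := by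
          rw [pvM_succ, hm1]; exact PySem.List.index?_append_singleton_self _ _ hmem
        have hnone : PySem.List.index? (pvM l q m) 1 = none :=
          (PySem.List.index?_eq_none_iff _ _).2 hmem
        rw [hfw, hnone, pvM_length]
        simp [hxy]

-- Pre_ yields a mismatch strictly below l.length
theorem pre_mem_one (l q : List Int) (hq : l.length ≤ q.length) (hne : l ≠ q.take l.length) :
    (1 : Int) ∈ pvM l q l.length := by
  have hlen : (q.take l.length).length = l.length := by simp; omega
  have : ∃ j, ∃ hj : j < l.length, l[j] ≠ q[j]'(by omega) := by
    by_contra hall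
    push Not at hall
    exact hne (List.ext_getElem (by omega) (fun i h1 h2 => by
      have := hall i h1
      simpa [List.getElem_take] using this))
  rcases this with ⟨j, hj, hjne⟩
  have hlg : PySem.List.pyGet? l (j : Int) = some l[j] := by
    rw [PySem.List.pyGet?_natCast]; exact List.getElem?_eq_getElem hj
  have hqg : PySem.List.pyGet? q (j : Int) = some (q[j]'(by omega)) := by
    rw [PySem.List.pyGet?_natCast]; exact List.getElem?_eq_getElem (by omega)
  refine List.mem_map.2 ⟨(j : Int), PySem.List.mem_pyRange_one.2 ⟨by positivity, by exact_mod_cast hj⟩, ?_⟩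
  simp [pvMark, hlg, hqg, hjne]

-- ===== VERDICT (by name: the statement is the Claim_ definition above) =====
theorem diff_start_end_spec : Claim_equal_diff_start_end := by
  intro l q _ hpre
  obtain ⟨hq, hne⟩ := hpre
  unfold Spec_diff_start_end diff_start_end diff_start_end_alt
  rw [foldA l q l.length le_rfl hq [], foldB l q l.length le_rfl hq]
  rcases Option.isSome_iff_exists.1 ((PySem.List.index?_isSome_iff (pvM l q l.length) 1).2
      (pre_mem_one l q hq hne)) with ⟨a, ha⟩
  rcases Option.isSome_iff_exists.1 ((PySem.List.index?_isSome_iff (pvM l q l.length).reverse 1).2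
      (by simpa using pre_mem_one l q hq hne)) with ⟨b, hb⟩
  simp only [List.nil_append, ha, hb, PySem.List.slice?_none_none_neg_one, Option.getD_some]
  simp [Prod.ext_iff]
  omega
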